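-- pv_equiv track=rewrite | github.com/annie-elequin/download-drive-to-nas | app/jobs.py | _match_pending_file_index
-- ===== SOURCE A (Python) =====
-- from typing import Any
--
-- def _match_pending_file_index(files: list[dict[str, Any]], to_path: str) -> int | None:
--     norm = to_path.replace("\\", "/")
--     for i, f in enumerate(files):
--         if f.get("status") != "pending":
--             continue
--         name = (f.get("name") or "").replace("\\", "/")
--         if not name:
--             continue
--         if norm.endswith(name) or norm.rstrip("/").endswith(name.split("/")[-1]):
--             return i
--     for i, f in enumerate(files):
--         if f.get("status") == "pending":
--             return i
--     return None
-- ===== SOURCE B (Python) =====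
-- def _match_pending_file_index(files, to_path):
--     # Backward scan: walk the list from the end, overwriting accumulators so
--     # the earliest (leftmost) candidates win; no early returns, no second pass.
--     norm = to_path.replace("\\", "/")
--     stripped = norm.rstrip("/")
--     match = None
--     first_pending = None
--     for i in range(len(files) - 1, -1, -1):
--         f = files[i]
--         if f.get("status") == "pending":
--             first_pending = i
--             name = (f.get("name") or "").replace("\\", "/")
--             if name and (norm.endswith(name) or stripped.endswith(name.split("/")[-1])):
--                 match = i
--     return match if match is not None else first_pending
-- ===== Notes on version B (the rewrite author's own statement) =====
-- stated objective: alternative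
-- what changed: B replaces A's two forward early-return loops with a single backward scan (right fold) that overwrites a match accumulator and a first-pending accumulator so the leftmost candidates win, then picks match over fallback once at the end.
import Mathlib
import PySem

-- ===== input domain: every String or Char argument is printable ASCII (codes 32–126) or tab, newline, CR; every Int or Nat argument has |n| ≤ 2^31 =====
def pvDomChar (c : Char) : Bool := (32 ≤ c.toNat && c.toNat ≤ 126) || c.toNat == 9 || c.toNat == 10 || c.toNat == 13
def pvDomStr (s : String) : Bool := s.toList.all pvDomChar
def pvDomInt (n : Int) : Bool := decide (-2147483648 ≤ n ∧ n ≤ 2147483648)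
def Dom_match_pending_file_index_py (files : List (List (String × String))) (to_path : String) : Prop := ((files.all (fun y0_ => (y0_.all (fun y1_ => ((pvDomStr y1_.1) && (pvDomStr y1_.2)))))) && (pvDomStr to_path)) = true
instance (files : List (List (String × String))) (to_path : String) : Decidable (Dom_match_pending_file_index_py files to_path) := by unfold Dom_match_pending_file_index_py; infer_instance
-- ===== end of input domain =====

-- B replaces A's two forward early-return loops with one backward scan whose two
-- accumulators are overwritten so the leftmost candidates win (objective: alternative).

-- shared primitive ports of the Python expressions both versions use
-- dict.get(k) on an association list: first match
def pvGet (f : List (String × String)) (k : String) : Option String :=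
  (f.find? (fun p => p.1 == k)).map (·.2)

-- s.rstrip("/"): drop trailing '/' characters (exact for this single-character strip set)
def pvRstripSlash (s : String) : String :=
  String.ofList (s.toList.rdropWhile (· == '/'))

-- name.split("/")[-1] (name is a string, "/" nonempty, so split? is some and nonempty)
def pvLastSeg (name : String) : String :=
  ((PySem.Str.split? name "/").getD []).getLastD ""

-- ===== PORT A =====
-- first loop of A: first pending entry with nonempty normalized name matching the suffix test
def pvLoopMatch (norm : String) (files : List (List (String × String))) (i : Int) : Option Int :=
  match files with
  | [] => none
  | f :: rest =>
    if pvGet f "status" ≠ some "pending" then pvLoopMatch norm rest (i + 1)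
    else
      let name := PySem.Str.replace ((pvGet f "name").getD "") "\\" "/"
      if name = "" then pvLoopMatch norm rest (i + 1)
      else if PySem.Str.endswith norm name
              || PySem.Str.endswith (pvRstripSlash norm) (pvLastSeg name) then some i
      else pvLoopMatch norm rest (i + 1)

-- second loop of A: index of the first pending entry
def pvLoopPending (files : List (List (String × String))) (i : Int) : Option Int :=
  match files with
  | [] => none
  | f :: rest =>
    if pvGet f "status" = some "pending" then some i
    else pvLoopPending rest (i + 1)

def match_pending_file_index_py (files : List (List (String × String))) (to_path : String) : Option Int :=
  let norm := PySem.Str.replace to_path "\\" "/"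
  match pvLoopMatch norm files 0 with
  | some i => some i
  | none => pvLoopPending files 0

-- ===== PORT B =====
-- enumerate the list with Int indices starting at i (B folds over it from the right,
-- which is the backward index loop of Source B)
def pvEnumFrom (i : Int) (files : List (List (String × String))) : List (Int × List (String × String)) :=
  match files with
  | [] => []
  | f :: rest => (i, f) :: pvEnumFrom (i + 1) rest

-- one backward step of Source B's loop: overwrite the accumulators at index p.1
def pvStepB (norm stripped : String) (p : Int × List (String × String))
    (acc : Option Int × Option Int) : Option Int × Option Int :=
  if pvGet p.2 "status" = some "pending" then
    let name := PySem.Str.replace ((pvGet p.2 "name").getD "") "\\" "/"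
    if name ≠ "" ∧ (PySem.Str.endswith norm name
          || PySem.Str.endswith stripped (pvLastSeg name)) = true then (some p.1, some p.1)
    else (acc.1, some p.1)
  else acc

def match_pending_file_index_py_alt (files : List (List (String × String))) (to_path : String) : Option Int :=
  let norm := PySem.Str.replace to_path "\\" "/"
  let stripped := pvRstripSlash norm
  let res := (pvEnumFrom 0 files).foldr (pvStepB norm stripped) (none, none)
  match res.1 with
  | some j => some j
  | none => res.2

-- ===== PRECONDITION & SPEC =====
def Spec_match_pending_file_index_py (files : List (List (String × String))) (to_path : String) (out : Option Int) : Prop := out = match_pending_file_index_py_alt files to_path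
instance (files : List (List (String × String))) (to_path : String) (out : Option Int) : Decidable (Spec_match_pending_file_index_py files to_path out) := by unfold Spec_match_pending_file_index_py; infer_instance

-- ===== CLAIM (what is proved, stated in full; the proofs are below) =====
def Claim_equal_match_pending_file_index_py : Prop := ∀ (files : List (List (String × String))) (to_path : String), Dom_match_pending_file_index_py files to_path → Spec_match_pending_file_index_py files to_path (match_pending_file_index_py files to_path)

-- ===== LEMMAS AND PROOFS =====
-- the right fold computes exactly (A's first loop result, A's second loop result)
theorem foldrB_eq (norm : String) (files : List (List (String × String))) :
    ∀ (i : Int),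
      (pvEnumFrom i files).foldr (pvStepB norm (pvRstripSlash norm)) (none, none) =
        (pvLoopMatch norm files i, pvLoopPending files i) := by
  induction files with
  | nil => intro i; rfl
  | cons f rest ih =>
    intro i
    simp only [pvEnumFrom, List.foldr_cons, ih, pvStepB, pvLoopMatch, pvLoopPending]
    by_cases hs : pvGet f "status" = some "pending"
    · rw [if_pos hs, if_neg (not_not_intro hs), if_pos hs]
      by_cases hn : PySem.Str.replace ((pvGet f "name").getD "") "\\" "/" = ""
      · rw [if_neg (fun h => h.1 hn), if_pos hn]
      · rw [if_neg hn]
        by_cases hm : (PySem.Str.endswith norm (PySem.Str.replace ((pvGet f "name").getD "") "\\" "/")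
            || PySem.Str.endswith (pvRstripSlash norm)
              (pvLastSeg (PySem.Str.replace ((pvGet f "name").getD "") "\\" "/"))) = true
        · rw [if_pos ⟨hn, hm⟩, if_pos hm]
        · rw [if_neg (fun h => hm h.2), if_neg hm]
    · rw [if_neg hs, if_neg hs, if_pos hs]

-- ===== VERDICT (by name: the statement is the Claim_ definition above) =====
theorem match_pending_file_index_py_spec : Claim_equal_match_pending_file_index_py := by
  intro files to_path _
  show match_pending_file_index_py files to_path = match_pending_file_index_py_alt files to_path
  unfold match_pending_file_index_py match_pending_file_index_py_alt
  simp only [foldrB_eq]
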